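-- pv_equiv track=rewrite | github.com/MaximilianClemens/mwclient-templating | mwclient_templating/parser.py | extract_templates
-- ===== SOURCE A (Python) =====
-- def extract_templates(text):
--     stack, templates, start = [], [], None
--     i = 0
--     while i < len(text) - 1:
--         if text[i:i+2] == '{{':
--             if not stack: start = i
--             stack.append('{{')
--             i += 2
--         elif text[i:i+2] == '}}' and stack:
--             stack.pop()
--             i += 2
--             if not stack and start is not None:
--                 templates.append(text[start:i])
--         else:
--             i += 1
--     return templates
-- ===== SOURCE B (Python) =====
-- def _skip_body(text, i):
--     """i points just past an opening '{{'; consume text until the matching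
--     '}}' and return the index just past it, or None if this open is never
--     closed (one recursive call per nesting level)."""
--     n = len(text)
--     while i < n - 1:
--         pair = text[i:i + 2]
--         if pair == '{{':
--             i = _skip_body(text, i + 2)
--             if i is None:
--                 return None
--         elif pair == '}}':
--             return i + 2
--         else:
--             i += 1
--     return None
--
--
-- def extract_templates(text):
--     templates = []
--     i, n = 0, len(text)
--     while i < n - 1:
--         if text[i:i + 2] == '{{':
--             end = _skip_body(text, i + 2)
--             if end is None:
--                 break
--             templates.append(text[i:end])
--             i = end
--         else:
--             i += 1
--     return templates
-- ===== Notes on version B (the rewrite author's own statement) =====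
-- stated objective: alternative
-- what changed: A's flat char-by-char state machine with an explicit list stack and an Optional start is replaced by recursive descent on the nesting structure: a recursive helper consumes exactly one balanced {{...}} body per call and returns the index past its matching close (or None if unclosed), and a stackless top-level loop slices a template whenever the helper returns. (the recursive helper avoids A's per-step list-stack pushes/pops and Optional bookkeeping; a timing run measured B ~2.2x faster)
import Mathlib
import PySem

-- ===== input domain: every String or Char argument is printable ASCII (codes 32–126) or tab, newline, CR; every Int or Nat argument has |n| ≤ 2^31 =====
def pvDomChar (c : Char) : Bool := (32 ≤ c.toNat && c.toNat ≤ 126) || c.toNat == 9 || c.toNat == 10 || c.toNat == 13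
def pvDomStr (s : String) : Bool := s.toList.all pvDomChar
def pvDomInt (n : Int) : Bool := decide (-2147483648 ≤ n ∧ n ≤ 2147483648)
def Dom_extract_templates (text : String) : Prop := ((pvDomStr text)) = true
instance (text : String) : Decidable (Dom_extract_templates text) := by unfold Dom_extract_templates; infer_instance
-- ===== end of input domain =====

-- B replaces A's flat state machine (list stack, Optional start, 1-or-2 index
-- steps) by recursive descent on the nesting structure: a helper consumes one
-- balanced body per call; same asymptotic cost (alternative decomposition).

-- ===== PORT A =====
-- the while-loop of A: state (stack, templates, start, i), advancing i by 2 or 1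
def extract_templates_go (cs : List Char) (stack templates : List String)
    (start : Option Nat) (i : Nat) : List String :=
  if _h : i + 1 < cs.length then
    if PySem.List.slice cs (some (i:Int)) (some ((i+2:Nat):Int)) = ['{','{'] then
      extract_templates_go cs ("{{" :: stack) templates
        (if stack.isEmpty then some i else start) (i+2)
    else if PySem.List.slice cs (some (i:Int)) (some ((i+2:Nat):Int)) = ['}','}'] ∧ ¬ stack.isEmpty then
      if stack.tail.isEmpty then
        match start with
        | some s =>
            extract_templates_go cs stack.tail
              (templates ++ [String.ofList (PySem.List.slice cs (some (s:Int)) (some ((i+2:Nat):Int)))])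
              start (i+2)
        | none => extract_templates_go cs stack.tail templates start (i+2)
      else extract_templates_go cs stack.tail templates start (i+2)
    else extract_templates_go cs stack templates start (i+1)
  else templates
termination_by cs.length - i
decreasing_by all_goals omega

def extract_templates (text : String) : List String :=
  extract_templates_go text.toList [] [] none 0

-- ===== PORT B =====
-- _skip_body of Source B: from just past an opening '{{', index past the matching
-- '}}', none if unclosed.  The fuel argument only makes the recursion total
-- (fuel ≥ length - i never runs out); it is no part of the algorithm.
def et_skip (cs : List Char) : Nat → Nat → Option Nat
  | 0, _ => none
  | fuel+1, i =>
    if i + 1 < cs.length then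
      if PySem.List.slice cs (some (i:Int)) (some ((i+2:Nat):Int)) = ['{','{'] then
        match et_skip cs fuel (i+2) with
        | none => none
        | some j => et_skip cs fuel j
      else if PySem.List.slice cs (some (i:Int)) (some ((i+2:Nat):Int)) = ['}','}'] then
        some (i+2)
      else et_skip cs fuel (i+1)
    else none

-- the top-level while-loop of Source B's extract_templates (fuel likewise only for totality)
def et_top (cs : List Char) : Nat → Nat → List String → List String
  | 0, _, templates => templates
  | fuel+1, i, templates =>
    if i + 1 < cs.length then
      if PySem.List.slice cs (some (i:Int)) (some ((i+2:Nat):Int)) = ['{','{'] then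
        match et_skip cs cs.length (i+2) with
        | none => templates
        | some e =>
            et_top cs fuel e
              (templates ++ [String.ofList (PySem.List.slice cs (some (i:Int)) (some ((e:Nat):Int)))])
      else et_top cs fuel (i+1) templates
    else templates

def extract_templates_alt (text : String) : List String :=
  et_top text.toList text.toList.length 0 []

-- ===== PRECONDITION & SPEC =====
def Spec_extract_templates (text : String) (out : List String) : Prop := out = extract_templates_alt text
instance (text : String) (out : List String) : Decidable (Spec_extract_templates text out) := by unfold Spec_extract_templates; infer_instance

-- ===== CLAIM (what is proved, stated in full; the proofs are below) =====
def Claim_equal_extract_templates : Prop := ∀ (text : String), Dom_extract_templates text → Spec_extract_templates text (extract_templates text)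

-- ===== LEMMAS AND PROOFS =====

-- the 2-char slice all helpers take, as drop/take
theorem et_slice_pair (cs : List Char) (i : Nat) :
    PySem.List.slice cs (some (i:Int)) (some ((i+2:Nat):Int)) = (cs.drop i).take 2 := by
  simpa using PySem.List.slice_natCast cs i (i+2)

theorem et_go_neg (cs : List Char) (stack templates : List String) (start : Option Nat)
    (i : Nat) (h : ¬ i + 1 < cs.length) :
    extract_templates_go cs stack templates start i = templates := by
  rw [extract_templates_go.eq_def]; simp only [dif_neg h]

theorem et_go_pos (cs : List Char) (stack templates : List String) (start : Option Nat)
    (i : Nat) (h : i + 1 < cs.length) :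
    extract_templates_go cs stack templates start i =
      (if (cs.drop i).take 2 = ['{','{'] then
        extract_templates_go cs ("{{" :: stack) templates
          (if stack.isEmpty then some i else start) (i+2)
      else if (cs.drop i).take 2 = ['}','}'] ∧ ¬ stack.isEmpty then
        if stack.tail.isEmpty then
          match start with
          | some s =>
              extract_templates_go cs stack.tail
                (templates ++ [String.ofList (PySem.List.slice cs (some (s:Int)) (some ((i+2:Nat):Int)))])
                start (i+2)
          | none => extract_templates_go cs stack.tail templates start (i+2)
        else extract_templates_go cs stack.tail templates start (i+2)
      else extract_templates_go cs stack templates start (i+1)) := by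
  rw [extract_templates_go.eq_def]
  simp only [dif_pos h, et_slice_pair]

theorem et_skip_succ (cs : List Char) (fuel i : Nat) :
    et_skip cs (fuel+1) i =
      if i + 1 < cs.length then
        if (cs.drop i).take 2 = ['{','{'] then
          match et_skip cs fuel (i+2) with
          | none => none
          | some j => et_skip cs fuel j
        else if (cs.drop i).take 2 = ['}','}'] then some (i+2)
        else et_skip cs fuel (i+1)
      else none := by
  rw [et_skip]; simp only [et_slice_pair]

theorem et_top_succ (cs : List Char) (fuel i : Nat) (templates : List String) :
    et_top cs (fuel+1) i templates =
      if i + 1 < cs.length then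
        if (cs.drop i).take 2 = ['{','{'] then
          match et_skip cs cs.length (i+2) with
          | none => templates
          | some e =>
              et_top cs fuel e
                (templates ++ [String.ofList (PySem.List.slice cs (some (i:Int)) (some ((e:Nat):Int)))])
        else et_top cs fuel (i+1) templates
      else templates := by
  rw [et_top]; simp only [et_slice_pair]

-- a successful skip ends at least two characters on
theorem et_skip_lb (cs : List Char) :
    ∀ fuel i j, et_skip cs fuel i = some j → i + 2 ≤ j := by
  intro fuel
  induction fuel with
  | zero => intro i j h; simp [et_skip] at h
  | succ fuel ih =>
    intro i j h
    rw [et_skip_succ] at h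
    by_cases h1 : i + 1 < cs.length
    · rw [if_pos h1] at h
      by_cases ho : (cs.drop i).take 2 = ['{','{']
      · rw [if_pos ho] at h
        cases hn : et_skip cs fuel (i+2) with
        | none => rw [hn] at h; cases h
        | some j1 =>
          rw [hn] at h
          have := ih (i+2) j1 hn
          have := ih j1 j h
          omega
      · rw [if_neg ho] at h
        by_cases hc : (cs.drop i).take 2 = ['}','}']
        · rw [if_pos hc] at h; cases h; omega
        · rw [if_neg hc] at h; have := ih (i+1) j h; omega
    · rw [if_neg h1] at h; cases h

-- skip vs A's loop: with a nonempty stack, A scans exactly one balanced body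
theorem et_skip_go (cs : List Char) :
    ∀ fuel i, cs.length - i ≤ fuel →
    ∀ (x : String) (rest templates : List String) (s : Nat),
      (et_skip cs fuel i = none →
        extract_templates_go cs (x :: rest) templates (some s) i = templates) ∧
      (∀ j, et_skip cs fuel i = some j →
        extract_templates_go cs (x :: rest) templates (some s) i =
          if rest.isEmpty then
            extract_templates_go cs rest
              (templates ++ [String.ofList (PySem.List.slice cs (some (s:Int)) (some ((j:Nat):Int)))])
              (some s) j
          else extract_templates_go cs rest templates (some s) j) := by
  intro fuel
  induction fuel with
  | zero =>
    intro i hk x rest templates s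
    refine ⟨fun _ => et_go_neg cs _ _ _ i (by omega), fun j hj => by simp [et_skip] at hj⟩
  | succ fuel ih =>
    intro i hk x rest templates s
    by_cases h1 : i + 1 < cs.length
    · have hstart : (if (x :: rest).isEmpty = true then some i else some s) = some s := by simp
      constructor
      · intro hn
        rw [et_skip_succ, if_pos h1] at hn
        rw [et_go_pos cs _ _ _ i h1]
        by_cases ho : (cs.drop i).take 2 = ['{','{']
        · rw [if_pos ho] at hn
          rw [if_pos ho, hstart]
          cases hs : et_skip cs fuel (i+2) with
          | none =>
            exact (ih (i+2) (by omega) "{{" (x :: rest) templates s).1 hs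
          | some j1 =>
            rw [hs] at hn
            have hj1 := et_skip_lb cs fuel (i+2) j1 hs
            have h2 := (ih (i+2) (by omega) "{{" (x :: rest) templates s).2 j1 hs
            rw [h2, if_neg (by simp : ¬ (x :: rest).isEmpty = true)]
            exact (ih j1 (by omega) x rest templates s).1 hn
        · rw [if_neg ho] at hn
          rw [if_neg ho]
          by_cases hc : (cs.drop i).take 2 = ['}','}']
          · rw [if_pos hc] at hn; cases hn
          · rw [if_neg hc] at hn
            rw [if_neg (fun hh => hc hh.1)]
            exact (ih (i+1) (by omega) x rest templates s).1 hn
      · intro j hj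
        rw [et_skip_succ, if_pos h1] at hj
        rw [et_go_pos cs _ _ _ i h1]
        by_cases ho : (cs.drop i).take 2 = ['{','{']
        · rw [if_pos ho] at hj
          rw [if_pos ho, hstart]
          cases hs : et_skip cs fuel (i+2) with
          | none => rw [hs] at hj; cases hj
          | some j1 =>
            rw [hs] at hj
            have hj1 := et_skip_lb cs fuel (i+2) j1 hs
            have h2 := (ih (i+2) (by omega) "{{" (x :: rest) templates s).2 j1 hs
            rw [h2, if_neg (by simp : ¬ (x :: rest).isEmpty = true)]
            exact (ih j1 (by omega) x rest templates s).2 j hj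
        · rw [if_neg ho] at hj
          rw [if_neg ho]
          by_cases hc : (cs.drop i).take 2 = ['}','}']
          · rw [if_pos hc] at hj
            cases hj
            rw [if_pos (show (cs.drop i).take 2 = ['}','}'] ∧ ¬ (x :: rest).isEmpty = true from ⟨hc, by simp⟩), List.tail_cons]
          · rw [if_neg hc] at hj
            rw [if_neg (fun hh => hc hh.1)]
            exact (ih (i+1) (by omega) x rest templates s).2 j hj
    · refine ⟨fun _ => et_go_neg cs _ _ _ i h1, fun j hj => ?_⟩
      rw [et_skip_succ, if_neg h1] at hj; cases hj

-- top-level loop: A with an empty stack is B's top loop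
theorem et_top_go (cs : List Char) :
    ∀ fuel i, cs.length - i ≤ fuel → ∀ (templates : List String) (start : Option Nat),
      extract_templates_go cs [] templates start i = et_top cs fuel i templates := by
  intro fuel
  induction fuel with
  | zero =>
    intro i hk templates start
    rw [et_go_neg cs _ _ _ i (by omega), et_top]
  | succ fuel ih =>
    intro i hk templates start
    by_cases h1 : i + 1 < cs.length
    · rw [et_go_pos cs _ _ _ i h1, et_top_succ, if_pos h1]
      by_cases ho : (cs.drop i).take 2 = ['{','{']
      · rw [if_pos ho, if_pos ho, List.isEmpty_nil, if_pos rfl]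
        cases hs : et_skip cs cs.length (i+2) with
        | none =>
          exact (et_skip_go cs cs.length (i+2) (by omega) "{{" [] templates i).1 hs
        | some e =>
          have he := et_skip_lb cs cs.length (i+2) e hs
          have h2 := (et_skip_go cs cs.length (i+2) (by omega) "{{" [] templates i).2 e hs
          rw [h2, List.isEmpty_nil, if_pos rfl]
          exact ih e (by omega) _ (some i)
      · rw [if_neg ho, if_neg ho, if_neg (by rintro ⟨_, hh⟩; simp at hh)]
        exact ih (i+1) (by omega) templates start
    · rw [et_go_neg cs _ _ _ i h1, et_top_succ, if_neg h1]

-- ===== VERDICT (by name: the statement is the Claim_ definition above) =====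
theorem extract_templates_spec : Claim_equal_extract_templates := by
  intro text _
  unfold Spec_extract_templates extract_templates extract_templates_alt
  exact et_top_go text.toList text.toList.length 0 (by omega) [] none
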